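-- pv_equiv track=rewrite | github.com/leonifrazao/RaxyMS-Security-Audit | raxy/api/proxy/manager.py | matches_country
-- ===== SOURCE A (Python) =====
-- from typing import Any, Dict, Iterable, List, Optional, Tuple, Union
--
-- def matches_country(entry: Dict[str, Any], desired: Optional[str]) -> bool:
--     """Valida se o registro atende ao filtro de país solicitado."""
--     if not desired:
--         return True
--     desired_norm = desired.strip().casefold()
--     if not desired_norm:
--         return True
--
--     candidates: List[str] = []
--     for key in ("country", "country_code", "country_name"):
--         value = entry.get(key)
--         if not value:
--             continue
--         value = str(value).strip()
--         if not value or value == "-":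
--             continue
--         candidates.append(value)
--
--     for value in candidates:
--         if value.casefold() == desired_norm:
--             return True
--     for value in candidates:
--         norm = value.casefold()
--         if desired_norm in norm or norm in desired_norm:
--             return True
--     return False
-- ===== SOURCE B (Python) =====
-- def _scan(entry, dn, keys):
--     """Recursively try the remaining keys; True as soon as one surviving
--     value matches dn by the two-way substring test (equality is subsumed)."""
--     if not keys:
--         return False
--     value = entry.get(keys[0])
--     if value:
--         value = str(value).strip()
--         if value and value != "-":
--             norm = value.casefold()
--             if dn in norm or norm in dn:
--                 return True
--     return _scan(entry, dn, keys[1:])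
--
--
-- def matches_country(entry, desired):
--     """Valida se o registro atende ao filtro de pais solicitado."""
--     if not desired:
--         return True
--     dn = desired.strip().casefold()
--     if not dn:
--         return True
--     return _scan(entry, dn, ["country", "country_code", "country_name"])
-- ===== Notes on version B (the rewrite author's own statement) =====
-- stated objective: simpler
-- what changed: B replaces A's staged pipeline (build a candidates list, then an exact-equality scan, then a substring scan) with a short-circuit recursion over the three keys that tests each surviving value once with the two-way substring check, which already subsumes equality.
import Mathlib
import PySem

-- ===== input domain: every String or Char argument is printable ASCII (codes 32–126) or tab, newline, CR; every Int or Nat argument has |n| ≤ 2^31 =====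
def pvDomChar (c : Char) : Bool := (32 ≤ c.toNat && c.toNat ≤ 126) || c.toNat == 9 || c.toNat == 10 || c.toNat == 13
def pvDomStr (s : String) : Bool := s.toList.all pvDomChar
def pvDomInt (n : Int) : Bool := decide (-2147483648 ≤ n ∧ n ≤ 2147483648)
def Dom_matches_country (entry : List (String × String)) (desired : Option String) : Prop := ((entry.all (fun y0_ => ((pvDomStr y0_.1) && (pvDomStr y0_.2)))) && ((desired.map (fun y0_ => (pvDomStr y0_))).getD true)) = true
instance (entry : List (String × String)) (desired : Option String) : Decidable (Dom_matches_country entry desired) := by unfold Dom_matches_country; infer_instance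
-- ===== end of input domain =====

-- B replaces A's staged pipeline (candidates list + exact-equality scan + substring scan)
-- by one short-circuit recursion over the three keys, testing each surviving value with the
-- two-way substring check (which subsumes equality); objective: simpler.
-- casefold is ported as PySem.Str.lower, exact on the ASCII domain.

-- ===== PORT A =====
def matches_country (entry : List (String × String)) (desired : Option String) : Bool :=
  match desired with
  | none => true
  | some d =>
    if d = "" then true
    else
      let desired_norm := PySem.Str.lower (PySem.Str.strip d)
      if desired_norm = "" then true
      else
        let candidates : List String :=
          ["country", "country_code", "country_name"].foldl (fun acc key =>
            match (PySem.Dict.mk entry).get? key with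
            | none => acc
            | some value =>
              if value = "" then acc
              else
                if PySem.Str.strip value = "" ∨ PySem.Str.strip value = "-" then acc
                else acc ++ [PySem.Str.strip value]) []
        if candidates.any (fun value => PySem.Str.lower value == desired_norm) then true
        else
          candidates.any (fun value =>
            PySem.Str.isIn desired_norm (PySem.Str.lower value) ||
              PySem.Str.isIn (PySem.Str.lower value) desired_norm)

-- ===== PORT B =====
-- recursive helper _scan of Source B: try the remaining keys, short-circuiting on a hit
def pvScan (entry : List (String × String)) (dn : String) : List String → Bool
  | [] => false
  | k :: ks =>
    match (PySem.Dict.mk entry).get? k with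
    | none => pvScan entry dn ks
    | some value =>
      if value = "" then pvScan entry dn ks
      else
        let v := PySem.Str.strip value
        if v = "" ∨ v = "-" then pvScan entry dn ks
        else
          let norm := PySem.Str.lower v
          if PySem.Str.isIn dn norm || PySem.Str.isIn norm dn then true
          else pvScan entry dn ks

def matches_country_alt (entry : List (String × String)) (desired : Option String) : Bool :=
  match desired with
  | none => true
  | some d =>
    if d = "" then true
    else
      let dn := PySem.Str.lower (PySem.Str.strip d)
      if dn = "" then true
      else pvScan entry dn ["country", "country_code", "country_name"]

-- ===== PRECONDITION & SPEC =====
def Spec_matches_country (entry : List (String × String)) (desired : Option String) (out : Bool) : Prop := out = matches_country_alt entry desired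
instance (entry : List (String × String)) (desired : Option String) (out : Bool) : Decidable (Spec_matches_country entry desired out) := by unfold Spec_matches_country; infer_instance

-- ===== CLAIM (what is proved, stated in full; the proofs are below) =====
def Claim_equal_matches_country : Prop := ∀ (entry : List (String × String)) (desired : Option String), Dom_matches_country entry desired → Spec_matches_country entry desired (matches_country entry desired)

-- ===== LEMMAS AND PROOFS =====

-- equality with desired_norm implies the two-way substring test fires
theorem pvEq_imp_sub (dn v : String) (h : (PySem.Str.lower v == dn) = true) :
    (PySem.Str.isIn dn (PySem.Str.lower v) || PySem.Str.isIn (PySem.Str.lower v) dn) = true := by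
  have hv : PySem.Str.lower v = dn := by simpa using h
  have hr : PySem.Chars.isIn dn.toList dn.toList = true := by
    simp [PySem.Chars.isIn_iff_infix]
  simp [hv, hr]

-- B's recursion equals an any over the keys with the per-key substring test
theorem pvScan_eq_any (entry : List (String × String)) (dn : String) (keys : List String) :
    pvScan entry dn keys
    = keys.any (fun key =>
        match (PySem.Dict.mk entry).get? key with
        | none => false
        | some value =>
          if value = "" then false
          else
            if PySem.Str.strip value = "" ∨ PySem.Str.strip value = "-" then false
            else
              PySem.Str.isIn dn (PySem.Str.lower (PySem.Str.strip value)) ||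
                PySem.Str.isIn (PySem.Str.lower (PySem.Str.strip value)) dn) := by
  induction keys with
  | nil => rfl
  | cons k ks ih =>
    simp only [pvScan, List.any_cons, ← ih]
    cases h : (PySem.Dict.mk entry).get? k with
    | none => simp
    | some value =>
      by_cases h1 : value = ""
      · simp [h1]
      · by_cases h2 : PySem.Str.strip value = "" ∨ PySem.Str.strip value = "-"
        · simp [h1, h2]
        · simp only [h1, h2, if_neg, not_false_iff]
          split <;> simp_all

-- A's candidates-building fold followed by .any equals a direct any over the keys
theorem pvFold_any (entry : List (String × String)) (keys : List String)
    (acc : List String) (p : String → Bool) :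
    (keys.foldl (fun acc key =>
        match (PySem.Dict.mk entry).get? key with
        | none => acc
        | some value =>
          if value = "" then acc
          else
            if PySem.Str.strip value = "" ∨ PySem.Str.strip value = "-" then acc
            else acc ++ [PySem.Str.strip value]) acc).any p
    = (acc.any p ||
       keys.any (fun key =>
        match (PySem.Dict.mk entry).get? key with
        | none => false
        | some value =>
          if value = "" then false
          else
            if PySem.Str.strip value = "" ∨ PySem.Str.strip value = "-" then false
            else p (PySem.Str.strip value))) := by
  induction keys generalizing acc with
  | nil => simp
  | cons k ks ih =>
    simp only [List.foldl_cons, List.any_cons]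
    rw [ih]
    cases h : (PySem.Dict.mk entry).get? k with
    | none => simp
    | some value =>
      by_cases h1 : value = ""
      · simp [h1]
      · by_cases h2 : PySem.Str.strip value = "" ∨ PySem.Str.strip value = "-" <;>
          simp_all [Bool.or_comm, Bool.or_assoc]

-- ===== VERDICT (by name: the statement is the Claim_ definition above) =====
theorem matches_country_spec : Claim_equal_matches_country := by
  intro entry desired _
  unfold Spec_matches_country matches_country matches_country_alt
  cases desired with
  | none => rfl
  | some d =>
    simp only
    by_cases hd : d = ""
    · simp [hd]
    · simp only [hd, if_false]
      by_cases hn : PySem.Str.lower (PySem.Str.strip d) = ""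
      · simp [hn]
      · simp only [hn, if_false]
        set dn := PySem.Str.lower (PySem.Str.strip d) with hdn
        rw [pvScan_eq_any,
            pvFold_any entry _ [] (fun value => PySem.Str.lower value == dn),
            pvFold_any entry _ [] (fun value =>
              PySem.Str.isIn dn (PySem.Str.lower value) ||
                PySem.Str.isIn (PySem.Str.lower value) dn)]
        simp only [List.any_nil, Bool.false_or]
        set keys : List String := ["country", "country_code", "country_name"] with hkeys
        by_cases hEq : (keys.any (fun key =>
            match (PySem.Dict.mk entry).get? key with
            | none => false
            | some value =>
              if value = "" then false
              else
                if PySem.Str.strip value = "" ∨ PySem.Str.strip value = "-" then false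
                else PySem.Str.lower (PySem.Str.strip value) == dn)) = true
        · rw [hEq]
          simp only [if_true]
          rw [List.any_eq_true] at hEq
          obtain ⟨k, hk, hkp⟩ := hEq
          symm
          rw [List.any_eq_true]
          refine ⟨k, hk, ?_⟩
          revert hkp
          cases (PySem.Dict.mk entry).get? k with
          | none => simp
          | some value =>
            by_cases h1 : value = ""
            · simp [h1]
            · by_cases h2 : PySem.Str.strip value = "" ∨ PySem.Str.strip value = "-"
              · simp [h1, h2]
              · simp only [h1, h2, ite_false]
                exact pvEq_imp_sub dn _
        · rw [Bool.not_eq_true] at hEq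
          rw [hEq]
          simp
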